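-- pv_equiv track=rewrite | github.com/khuushichand/aiml-project | tldw_Server_API/app/core/DB_Management/backends/query_utils.py | convert_sqlite_placeholders_to_postgres
-- ===== SOURCE A (Python) =====
-- from typing import Any, Dict, Iterable, List, Optional, Sequence, Tuple, Union
--
-- def convert_sqlite_placeholders_to_postgres(query: str) -> str:
--     """Convert SQLite positional placeholders (`?`) to PostgreSQL (`%s`)."""
--     if "?" not in query:
--         return query
--
--     result: List[str] = []
--     in_single = False
--     in_double = False
--     i = 0
--     length = len(query)
--
--     while i < length:
--         ch = query[i]
--
--         if ch == "'" and not in_double: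
--             if in_single:
--                 if i + 1 < length and query[i + 1] == "'":
--                     result.append("''")
--                     i += 2
--                     continue
--                 in_single = False
--                 result.append(ch)
--                 i += 1
--                 continue
--             in_single = True
--             result.append(ch)
--             i += 1
--             continue
--
--         if ch == '"' and not in_single:
--             if in_double:
--                 if i + 1 < length and query[i + 1] == '"':
--                     result.append('""')
--                     i += 2
--                     continue
--                 in_double = False
--                 result.append(ch)
--                 i += 1
--                 continue
--             in_double = True
--             result.append(ch)
--             i += 1
--             continue
--
--         if ch == "?" and not in_single and not in_double:
--             result.append("%s")
--             i += 1
--             continue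
--
--         result.append(ch)
--         i += 1
--
--     return ''.join(result)
-- ===== SOURCE B (Python) =====
-- def convert_sqlite_placeholders_to_postgres(query: str) -> str:
--     """Convert SQLite positional placeholders (`?`) to PostgreSQL (`%s`).
--
--     Chunk scanner: jump with str.find between special characters instead of
--     walking the string character by character.
--     """
--     parts = []
--     i = 0
--     n = len(query)
--     while i < n:
--         # outside any quote: find the next special character
--         cands = [j for j in (query.find(c, i) for c in "'\"?") if j != -1]
--         if not cands:
--             parts.append(query[i:])
--             break
--         j = min(cands)
--         ch = query[j]
--         if ch == '?':
--             parts.append(query[i:j])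
--             parts.append('%s')
--             i = j + 1
--         else:
--             parts.append(query[i:j + 1])  # up to and including the opening quote
--             i = j + 1
--             # inside a ch-quoted region: find the closing quote
--             while True:
--                 e = query.find(ch, i)
--                 if e == -1:  # unterminated: copy the rest verbatim
--                     parts.append(query[i:])
--                     i = n
--                     break
--                 if e + 1 < n and query[e + 1] == ch:  # escaped (doubled) quote
--                     parts.append(query[i:e + 2])
--                     i = e + 2
--                 else:
--                     parts.append(query[i:e + 1])
--                     i = e + 1
--                     break
--     return ''.join(parts)
-- ===== Notes on version B (the rewrite author's own statement) =====
-- stated objective: alternative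
-- what changed: Replaces A's character-at-a-time state-machine loop (two boolean quote flags, one append per character) with a chunk scanner that uses str.find to jump to the next special character, copies whole slices verbatim, and handles each quoted region in a dedicated inner find-loop.
import Mathlib
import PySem

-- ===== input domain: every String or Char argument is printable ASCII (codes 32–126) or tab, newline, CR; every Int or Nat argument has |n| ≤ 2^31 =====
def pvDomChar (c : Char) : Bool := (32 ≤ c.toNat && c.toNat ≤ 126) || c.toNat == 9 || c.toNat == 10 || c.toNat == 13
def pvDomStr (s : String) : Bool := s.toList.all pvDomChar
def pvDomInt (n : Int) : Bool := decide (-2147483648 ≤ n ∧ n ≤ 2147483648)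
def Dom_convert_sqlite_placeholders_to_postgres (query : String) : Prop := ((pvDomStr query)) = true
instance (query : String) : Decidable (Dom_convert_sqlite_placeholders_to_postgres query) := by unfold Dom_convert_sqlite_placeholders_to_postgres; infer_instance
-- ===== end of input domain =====

-- B replaces A's per-character scan (two boolean quote flags) by a chunk scanner that jumps
-- between special characters with `find` and copies the text between them in one slice (objective: alternative).

-- ===== PORT A =====
-- A's while-loop over index i with flags in_single/in_double and a result list; ported as a
-- recursion over the remaining suffix of the character list (the `i+1 < length and query[i+1] == q`
-- look-ahead is the pattern match on the tail); the state (flags, accumulated result) is identical.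
def pvLoopA (cs : List Char) (s d : Bool) (res : List Char) : List Char :=
  match cs with
  | [] => res
  | c :: rest =>
    if c = '\'' ∧ d = false then
      if s then
        match _hr : rest with
        | c2 :: rest2 =>
          if c2 = '\'' then pvLoopA rest2 s d (res ++ ['\'', '\''])
          else pvLoopA rest false d (res ++ [c])
        | [] => pvLoopA rest false d (res ++ [c])
      else pvLoopA rest true d (res ++ [c])
    else if c = '"' ∧ s = false then
      if d then
        match _hr : rest with
        | c2 :: rest2 =>
          if c2 = '"' then pvLoopA rest2 s d (res ++ ['"', '"'])
          else pvLoopA rest s false (res ++ [c])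
        | [] => pvLoopA rest s false (res ++ [c])
      else pvLoopA rest s true (res ++ [c])
    else if c = '?' ∧ s = false ∧ d = false then
      pvLoopA rest s d (res ++ ['%', 's'])
    else pvLoopA rest s d (res ++ [c])
termination_by cs.length
decreasing_by all_goals ((try subst _hr); simp)

-- '"?" in query' (single-character needle) is membership of that character
def convert_sqlite_placeholders_to_postgres (query : String) : String :=
  if ¬ ('?' ∈ query.toList) then query
  else String.ofList (pvLoopA query.toList false false [])

-- ===== PORT B =====
-- min of the candidate list [j for j in finds if j != -1] (str.find over the current suffix is idxOf?)
def pvMinOpt (a b : Option Nat) : Option Nat :=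
  match a, b with
  | none, b => b
  | some x, none => some x
  | some x, some y => some (min x y)

-- the inner `while True` loop of Source B: body = suffix after the opening quote; returns
-- (the chunk copied while inside the quote, the suffix after the closing quote — [] when
-- the quote is unterminated, in which case Source B sets i = n and the outer loop ends too)
def pvScanQ (ch : Char) (body : List Char) : List Char × List Char :=
  match body.idxOf? ch with
  | none => (body, [])
  | some e =>
    match h2 : body.drop (e+1) with
    | c2 :: rest2 =>
      if c2 = ch then (body.take (e+2) ++ (pvScanQ ch rest2).1, (pvScanQ ch rest2).2)
      else (body.take (e+1), body.drop (e+1))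
    | [] => (body.take (e+1), [])
termination_by body.length
decreasing_by all_goals
  (have h3 := congrArg List.length h2; simp [List.length_drop] at h3; omega)

-- needed by pvScanB's termination proof (cited in its decreasing_by)
theorem pvScanQ_snd_length_le (ch : Char) (body : List Char) :
    (pvScanQ ch body).2.length ≤ body.length := by
  fun_induction pvScanQ ch body with
  | case1 body he => simp
  | case2 body e he rest2 h2 ih =>
    have h3 := congrArg List.length h2
    simp [List.length_drop] at h3
    simp
    omega
  | case3 body e he c2 rest2 h2 => simp [List.length_drop]
  | case4 body e he h2 => simp

-- needed by pvScanB's termination proof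
theorem pvMin3_some_ne_nil {cs : List Char} {j : Nat}
    (h : pvMinOpt (cs.idxOf? '\'') (pvMinOpt (cs.idxOf? '"') (cs.idxOf? '?')) = some j) :
    cs ≠ [] := by
  intro hn; subst hn; simp [List.idxOf?_nil, pvMinOpt] at h

-- the outer while-loop of Source B, on the remaining suffix
def pvScanB (cs : List Char) : List Char :=
  match h : pvMinOpt (cs.idxOf? '\'') (pvMinOpt (cs.idxOf? '"') (cs.idxOf? '?')) with
  | none => cs
  | some j =>
    if cs.getD j ' ' = '?' then   -- query[j]; j is a valid index returned by find
      cs.take j ++ '%' :: 's' :: pvScanB (cs.drop (j+1))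
    else
      cs.take (j+1) ++ (pvScanQ (cs.getD j ' ') (cs.drop (j+1))).1
        ++ pvScanB (pvScanQ (cs.getD j ' ') (cs.drop (j+1))).2
termination_by cs.length
decreasing_by
  · have hne := pvMin3_some_ne_nil h
    have : 0 < cs.length := List.length_pos_iff.mpr hne
    simp [List.length_drop]
    omega
  · have hne := pvMin3_some_ne_nil h
    have h1 : 0 < cs.length := List.length_pos_iff.mpr hne
    have h2 := pvScanQ_snd_length_le (cs.getD j ' ') (cs.drop (j+1))
    simp [List.length_drop] at h2 ⊢
    omega

def convert_sqlite_placeholders_to_postgres_alt (query : String) : String :=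
  String.ofList (pvScanB query.toList)

-- ===== PRECONDITION & SPEC =====
def Spec_convert_sqlite_placeholders_to_postgres (query : String) (out : String) : Prop := out = convert_sqlite_placeholders_to_postgres_alt query
instance (query : String) (out : String) : Decidable (Spec_convert_sqlite_placeholders_to_postgres query out) := by unfold Spec_convert_sqlite_placeholders_to_postgres; infer_instance

-- ===== CLAIM (what is proved, stated in full; the proofs are below) =====
def Claim_equal_convert_sqlite_placeholders_to_postgres : Prop := ∀ (query : String), Dom_convert_sqlite_placeholders_to_postgres query → Spec_convert_sqlite_placeholders_to_postgres query (convert_sqlite_placeholders_to_postgres query)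

-- ===== LEMMAS AND PROOFS =====

theorem idxOf?_cons_self (c : Char) (l : List Char) : (c :: l).idxOf? c = some 0 := by
  simp [List.idxOf?, List.findIdx?_cons]

theorem idxOf?_cons_ne {c c' : Char} (l : List Char) (h : c' ≠ c) :
    (c' :: l).idxOf? c = (l.idxOf? c).map (· + 1) := by
  simp [List.idxOf?, List.findIdx?_cons, h]

theorem minOpt_zero_left (b : Option Nat) : pvMinOpt (some 0) b = some 0 := by
  cases b <;> simp [pvMinOpt]

theorem minOpt_zero_right (a : Option Nat) : pvMinOpt a (some 0) = some 0 := by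
  cases a <;> simp [pvMinOpt]

theorem minOpt_map (a b : Option Nat) :
    pvMinOpt (a.map (· + 1)) (b.map (· + 1)) = (pvMinOpt a b).map (· + 1) := by
  cases a <;> cases b <;> simp [pvMinOpt]

theorem scanB_nil : pvScanB [] = [] := by
  rw [pvScanB]
  simp [List.idxOf?_nil, pvMinOpt]

theorem scanQ_nil (ch : Char) : pvScanQ ch [] = ([], []) := by
  rw [pvScanQ]
  simp [List.idxOf?_nil]


theorem scanQ_cons_plain {c ch : Char} (rest : List Char) (hc : c ≠ ch) :
    pvScanQ ch (c :: rest) = (c :: (pvScanQ ch rest).1, (pvScanQ ch rest).2) := by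
  rw [pvScanQ, idxOf?_cons_ne rest hc]
  conv_rhs => rw [pvScanQ]
  cases hidx : rest.idxOf? ch with
  | none => simp
  | some e =>
    simp only [Option.map_some, List.drop_succ_cons]
    cases hd : rest.drop (e+1) with
    | nil => simp
    | cons c2 rest2 =>
      by_cases h2 : c2 = ch <;> simp [h2, List.take_succ_cons]

theorem scanQ_head_nil (ch : Char) : pvScanQ ch [ch] = ([ch], []) := by
  rw [pvScanQ, idxOf?_cons_self]; simp

theorem scanQ_head_dbl (ch : Char) (rest2 : List Char) :
    pvScanQ ch (ch :: ch :: rest2) = (ch :: ch :: (pvScanQ ch rest2).1, (pvScanQ ch rest2).2) := by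
  rw [pvScanQ, idxOf?_cons_self]; simp

theorem scanQ_head_close {ch c2 : Char} (rest2 : List Char) (h : c2 ≠ ch) :
    pvScanQ ch (ch :: c2 :: rest2) = ([ch], c2 :: rest2) := by
  rw [pvScanQ, idxOf?_cons_self]; simp [h]

theorem scanB_unfold (cs : List Char) : pvScanB cs =
    (match pvMinOpt (cs.idxOf? '\'') (pvMinOpt (cs.idxOf? '"') (cs.idxOf? '?')) with
     | none => cs
     | some j =>
       if cs.getD j ' ' = '?' then
         cs.take j ++ '%' :: 's' :: pvScanB (cs.drop (j+1))
       else
         cs.take (j+1) ++ (pvScanQ (cs.getD j ' ') (cs.drop (j+1))).1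
           ++ pvScanB (pvScanQ (cs.getD j ' ') (cs.drop (j+1))).2) := by
  rw [pvScanB]
  split <;> simp_all

theorem scanB_cons_sq (rest : List Char) :
    pvScanB ('\'' :: rest) = '\'' :: ((pvScanQ '\'' rest).1 ++ pvScanB (pvScanQ '\'' rest).2) := by
  rw [scanB_unfold]
  simp [idxOf?_cons_self, minOpt_zero_left]

theorem scanB_cons_dq (rest : List Char) :
    pvScanB ('"' :: rest) = '"' :: ((pvScanQ '"' rest).1 ++ pvScanB (pvScanQ '"' rest).2) := by
  rw [scanB_unfold]
  simp [idxOf?_cons_self, idxOf?_cons_ne rest (by decide : ('"' : Char) ≠ '\''),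
        minOpt_zero_left, minOpt_zero_right]

theorem scanB_cons_qm (rest : List Char) :
    pvScanB ('?' :: rest) = '%' :: 's' :: pvScanB rest := by
  rw [scanB_unfold]
  simp [idxOf?_cons_self, idxOf?_cons_ne rest (by decide : ('?' : Char) ≠ '\''),
        idxOf?_cons_ne rest (by decide : ('?' : Char) ≠ '"'),
        minOpt_zero_right]

theorem scanB_cons_plain {c : Char} (rest : List Char)
    (h1 : c ≠ '\'') (h2 : c ≠ '"') (h3 : c ≠ '?') :
    pvScanB (c :: rest) = c :: pvScanB rest := by
  rw [scanB_unfold]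
  conv_rhs => rw [scanB_unfold]
  rw [idxOf?_cons_ne rest h1, idxOf?_cons_ne rest h2, idxOf?_cons_ne rest h3,
      minOpt_map, minOpt_map]
  cases hmin : pvMinOpt (rest.idxOf? '\'') (pvMinOpt (rest.idxOf? '"') (rest.idxOf? '?')) with
  | none => simp
  | some j =>
    simp only [Option.map_some]
    by_cases hq : rest.getD j ' ' = '?' <;>
      rw [List.getD_eq_getElem?_getD] at hq <;>
      simp [hq, List.take_succ_cons, List.drop_succ_cons]

theorem loopA_nil (s d : Bool) (acc : List Char) : pvLoopA [] s d acc = acc := by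
  rw [pvLoopA]

theorem loopA_eq_scan (n : Nat) : ∀ (cs : List Char), cs.length ≤ n →
    (∀ acc, pvLoopA cs false false acc = acc ++ pvScanB cs) ∧
    (∀ acc, pvLoopA cs true false acc =
      acc ++ (pvScanQ '\'' cs).1 ++ pvScanB (pvScanQ '\'' cs).2) ∧
    (∀ acc, pvLoopA cs false true acc =
      acc ++ (pvScanQ '"' cs).1 ++ pvScanB (pvScanQ '"' cs).2) := by
  induction n with
  | zero =>
    intro cs hlen
    have hnil : cs = [] := by cases cs <;> simp at hlen ⊢
    subst hnil
    refine ⟨?_, ?_, ?_⟩ <;> intro acc <;> simp [loopA_nil, scanB_nil, scanQ_nil]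
  | succ n ih =>
    intro cs hlen
    cases cs with
    | nil =>
      refine ⟨?_, ?_, ?_⟩ <;> intro acc <;> simp [loopA_nil, scanB_nil, scanQ_nil]
    | cons c rest =>
      have hr : rest.length ≤ n := by simp at hlen; omega
      obtain ⟨ihO, ihS, ihD⟩ := ih rest hr
      refine ⟨?_, ?_, ?_⟩ <;> intro acc
      · -- outside state
        by_cases h1 : c = '\''
        · subst h1
          rw [pvLoopA.eq_def]
          simp only [Char.reduceEq, and_self, reduceIte, Bool.false_eq_true, and_true]
          rw [scanB_cons_sq, ihS]
          simp
        · by_cases h2 : c = '"'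
          · subst h2
            rw [pvLoopA.eq_def]
            simp only [Char.reduceEq, false_and, reduceIte, and_self, Bool.false_eq_true]
            rw [scanB_cons_dq, ihD]
            simp
          · by_cases h3 : c = '?'
            · subst h3
              rw [pvLoopA.eq_def]
              simp only [Char.reduceEq, false_and, reduceIte, and_self]
              rw [scanB_cons_qm, ihO]
              simp
            · rw [pvLoopA.eq_def]
              simp only [h1, h2, h3, false_and, reduceIte]
              rw [scanB_cons_plain rest h1 h2 h3, ihO]
              simp
      · -- inside a single-quoted region
        by_cases h1 : c = '\''
        · subst h1
          cases rest with
          | nil =>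
            rw [pvLoopA.eq_def]
            simp [loopA_nil, scanQ_head_nil, scanB_nil]
          | cons c2 rest2 =>
            have hr2 : rest2.length ≤ n := by simp at hlen; omega
            obtain ⟨ihO2, ihS2, ihD2⟩ := ih rest2 hr2
            by_cases hc2 : c2 = '\''
            · subst hc2
              rw [pvLoopA.eq_def]
              simp only [Char.reduceEq, and_self, reduceIte]
              rw [scanQ_head_dbl, ihS2]
              simp
            · rw [pvLoopA.eq_def]
              simp only [Char.reduceEq, and_self, reduceIte, hc2]
              rw [scanQ_head_close rest2 hc2, ihO]
        · rw [pvLoopA.eq_def]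
          simp only [h1, false_and, reduceIte, Bool.true_eq_false, and_false]
          rw [scanQ_cons_plain rest h1, ihS]
          simp
      · -- inside a double-quoted region
        by_cases h2 : c = '"'
        · subst h2
          cases rest with
          | nil =>
            rw [pvLoopA.eq_def]
            simp [loopA_nil, scanQ_head_nil, scanB_nil]
          | cons c2 rest2 =>
            have hr2 : rest2.length ≤ n := by simp at hlen; omega
            obtain ⟨ihO2, ihS2, ihD2⟩ := ih rest2 hr2
            by_cases hc2 : c2 = '"'
            · subst hc2
              rw [pvLoopA.eq_def]
              simp only [Char.reduceEq, and_self, reduceIte, false_and, Bool.true_eq_false]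
              rw [scanQ_head_dbl, ihD2]
              simp
            · rw [pvLoopA.eq_def]
              simp only [Char.reduceEq, and_self, reduceIte, false_and, Bool.true_eq_false, hc2]
              rw [scanQ_head_close rest2 hc2, ihO]
        · rw [pvLoopA.eq_def]
          simp only [h2, false_and, reduceIte, Bool.true_eq_false, and_false]
          rw [scanQ_cons_plain rest h2, ihD]
          simp

-- when the query contains no '?', A's loop copies every character unchanged
theorem loopA_id : ∀ (cs : List Char) (s d : Bool) (acc : List Char), '?' ∉ cs →
    pvLoopA cs s d acc = acc ++ cs := by
  intro cs s d acc
  fun_induction pvLoopA cs s d acc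
  all_goals intro hq
  all_goals simp_all

-- ===== VERDICT (by name: the statement is the Claim_ definition above) =====
theorem convert_sqlite_placeholders_to_postgres_spec : Claim_equal_convert_sqlite_placeholders_to_postgres := by
  intro query _
  unfold Spec_convert_sqlite_placeholders_to_postgres
  unfold convert_sqlite_placeholders_to_postgres convert_sqlite_placeholders_to_postgres_alt
  obtain ⟨hO, -, -⟩ := loopA_eq_scan query.toList.length query.toList (le_refl _)
  by_cases hq : '?' ∈ query.toList
  · rw [if_neg (by simpa using hq)]
    rw [hO []]
    simp
  · rw [if_pos (by simpa using hq)]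
    have hid := loopA_id query.toList false false [] hq
    rw [hO []] at hid
    simp at hid
    rw [hid, String.ofList_toList]
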